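-- pv_equiv track=rewrite | github.com/cuioss/plan-marshall | marketplace/bundles/pm-dev-java/skills/plan-marshall-plugin/scripts/_gradle_cmd_discover.py | _parse_properties_output
-- ===== SOURCE A (Python) =====
-- def _parse_properties_output(log_content: str) -> dict:
--     """Parse Gradle properties output for metadata.
--
--     Output format:
--         group: com.example
--         name: my-module
--         version: 1.0.0
--         description: My module description
--
--     Args:
--         log_content: Content of Gradle properties output
--
--     Returns:
--         Dict with group_id, name, version, description
--     """
--     metadata: dict[str, str | None] = {
--         'group_id': None,
--         'name': None,
--         'version': None,
--         'description': None,
--     }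
--
--     for line in log_content.split('\n'):
--         if line.startswith('group:'):
--             value = line[6:].strip()
--             if value and value != 'null':
--                 metadata['group_id'] = value
--         elif line.startswith('name:'):
--             value = line[5:].strip()
--             if value and value != 'null':
--                 metadata['name'] = value
--         elif line.startswith('version:'):
--             value = line[8:].strip()
--             if value and value not in ('null', 'unspecified'):
--                 metadata['version'] = value
--         elif line.startswith('description:'):
--             value = line[12:].strip()
--             if value and value != 'null':
--                 metadata['description'] = value
--
--     return metadata
-- ===== SOURCE B (Python) =====
-- def _parse_properties_output(log_content: str) -> dict:
--     """Parse Gradle properties output for metadata.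
--
--     Staged version: for each field independently, scan the lines back to
--     front and keep the latest valid value (equivalent to A's forward
--     overwrite, since the four prefixes are mutually exclusive).
--     """
--     lines = log_content.split('\n')
--
--     def last_value(prefix, forbidden):
--         for line in reversed(lines):
--             if line.startswith(prefix):
--                 value = line[len(prefix):].strip()
--                 if value and value not in forbidden:
--                     return value
--         return None
--
--     return {
--         'group_id': last_value('group:', ('null',)),
--         'name': last_value('name:', ('null',)),
--         'version': last_value('version:', ('null', 'unspecified')),
--         'description': last_value('description:', ('null',)),
--     }
-- ===== Notes on version B (the rewrite author's own statement) =====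
-- stated objective: alternative
-- what changed: Instead of one forward pass that overwrites a dict through a four-way if/elif chain, B scans the line list back to front once per field and returns the first (i.e. latest) valid value for that field; correct because the four prefixes are mutually exclusive so each field's final value is the last valid matching line.
import Mathlib
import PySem

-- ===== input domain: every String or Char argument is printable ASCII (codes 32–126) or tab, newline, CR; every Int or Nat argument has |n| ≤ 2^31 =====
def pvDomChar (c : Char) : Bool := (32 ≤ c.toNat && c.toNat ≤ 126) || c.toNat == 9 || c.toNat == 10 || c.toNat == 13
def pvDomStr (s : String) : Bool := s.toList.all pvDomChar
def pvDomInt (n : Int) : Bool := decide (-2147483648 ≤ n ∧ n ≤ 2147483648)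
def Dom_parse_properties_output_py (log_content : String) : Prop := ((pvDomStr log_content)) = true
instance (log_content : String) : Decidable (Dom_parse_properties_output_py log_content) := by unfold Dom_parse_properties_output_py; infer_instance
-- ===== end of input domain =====

-- B replaces A's single forward overwrite pass (if/elif dict updates) with an independent
-- back-to-front scan per field that returns the latest valid value; return values agree.

-- ===== PORT A =====
-- per-line body of A's for-loop: the four-way if/elif chain updating the dict
def pvStepA (d : PySem.Dict String (Option String)) (line : String) : PySem.Dict String (Option String) :=
  if PySem.Str.startswith line "group:" then
    let value := PySem.Str.strip (PySem.Str.slice line (some 6) none)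
    if value ≠ "" ∧ value ≠ "null" then d.insert "group_id" (some value) else d
  else if PySem.Str.startswith line "name:" then
    let value := PySem.Str.strip (PySem.Str.slice line (some 5) none)
    if value ≠ "" ∧ value ≠ "null" then d.insert "name" (some value) else d
  else if PySem.Str.startswith line "version:" then
    let value := PySem.Str.strip (PySem.Str.slice line (some 8) none)
    if value ≠ "" ∧ value ∉ ["null", "unspecified"] then d.insert "version" (some value) else d
  else if PySem.Str.startswith line "description:" then
    let value := PySem.Str.strip (PySem.Str.slice line (some 12) none)
    if value ≠ "" ∧ value ≠ "null" then d.insert "description" (some value) else d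
  else d

def parse_properties_output_py (log_content : String) : List (String × Option String) :=
  (((PySem.Str.split? log_content "\n").getD []).foldl pvStepA
    (PySem.Dict.mk [("group_id", none), ("name", none), ("version", none), ("description", none)])).items

-- ===== PORT B =====
-- Source B's last_value: walk the reversed line list, return the first valid value
def pvLastValue (revLines : List String) (pre : String) (forbidden : List String) : Option String :=
  match revLines with
  | [] => none
  | line :: rest =>
    if PySem.Str.startswith line pre then
      let value := PySem.Str.strip (PySem.Str.slice line (some (PySem.Str.len pre : Int)) none)
      if value ≠ "" ∧ value ∉ forbidden then some value else pvLastValue rest pre forbidden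
    else pvLastValue rest pre forbidden

def parse_properties_output_py_alt (log_content : String) : List (String × Option String) :=
  let r := ((PySem.Str.split? log_content "\n").getD []).reverse
  [("group_id", pvLastValue r "group:" ["null"]),
   ("name", pvLastValue r "name:" ["null"]),
   ("version", pvLastValue r "version:" ["null", "unspecified"]),
   ("description", pvLastValue r "description:" ["null"])]

-- ===== PRECONDITION & SPEC =====
def Spec_parse_properties_output_py (log_content : String) (out : List (String × Option String)) : Prop := out = parse_properties_output_py_alt log_content
instance (log_content : String) (out : List (String × Option String)) : Decidable (Spec_parse_properties_output_py log_content out) := by unfold Spec_parse_properties_output_py; infer_instance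

-- ===== CLAIM (what is proved, stated in full; the proofs are below) =====
def Claim_equal_parse_properties_output_py : Prop := ∀ (log_content : String), Dom_parse_properties_output_py log_content → Spec_parse_properties_output_py log_content (parse_properties_output_py log_content)

-- ===== LEMMAS AND PROOFS =====

-- what one line contributes to one field
def pvOne (line pre : String) (forbidden : List String) : Option String :=
  if PySem.Str.startswith line pre then
    let value := PySem.Str.strip (PySem.Str.slice line (some (PySem.Str.len pre : Int)) none)
    if value ≠ "" ∧ value ∉ forbidden then some value else none
  else none

theorem pvLastValue_cons (l : String) (rest : List String) (pre : String) (forb : List String) :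
    pvLastValue (l :: rest) pre forb = (pvOne l pre forb).or (pvLastValue rest pre forb) := by
  simp only [pvLastValue, pvOne]
  split_ifs <;> simp

theorem pvLastValue_append (xs : List String) (l : String) (pre : String) (forb : List String) :
    pvLastValue (xs ++ [l]) pre forb = (pvLastValue xs pre forb).or (pvOne l pre forb) := by
  induction xs with
  | nil => simp [pvLastValue_cons, pvLastValue]
  | cons x xs ih =>
    rw [List.cons_append, pvLastValue_cons, pvLastValue_cons, ih, Option.or_assoc]

-- two prefixes with different first characters cannot both match
theorem pv_disj (l p q : String) (c₁ c₂ : Char) (t₁ t₂ : List Char)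
    (hp : p.toList = c₁ :: t₁) (hq : q.toList = c₂ :: t₂) (hne : c₁ ≠ c₂)
    (h : PySem.Str.startswith l p = true) : PySem.Str.startswith l q = false := by
  simp only [PySem.Str.startswith_eq, PySem.Chars.startswith_iff, hp, hq] at *
  rcases h with ⟨t, ht⟩
  rw [Bool.eq_false_iff]
  intro hcon
  rw [PySem.Chars.startswith_iff] at hcon
  rcases hcon with ⟨u, hu⟩
  rw [List.cons_append] at ht hu
  rw [← ht] at hu
  exact hne (List.cons.injEq .. ▸ hu :  _ ∧ _).1.symm

-- one loop iteration of A, on a dict of the invariant shape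
theorem pvStepA_shape (g n v d : Option String) (l : String) :
    pvStepA (PySem.Dict.mk [("group_id", g), ("name", n), ("version", v), ("description", d)]) l
      = PySem.Dict.mk [("group_id", (pvOne l "group:" ["null"]).or g),
                       ("name", (pvOne l "name:" ["null"]).or n),
                       ("version", (pvOne l "version:" ["null", "unspecified"]).or v),
                       ("description", (pvOne l "description:" ["null"]).or d)] := by
  have h6 : (PySem.Str.len "group:" : Int) = 6 := by decide
  have h5 : (PySem.Str.len "name:" : Int) = 5 := by decide
  have h8 : (PySem.Str.len "version:" : Int) = 8 := by decide
  have h12 : (PySem.Str.len "description:" : Int) = 12 := by decide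
  simp only [pvStepA, pvOne, h6, h5, h8, h12]
  by_cases hg : PySem.Str.startswith l "group:" = true
  · have hn := pv_disj l "group:" "name:" 'g' 'n' "roup:".toList "ame:".toList (by decide) (by decide) (by decide) hg
    have hv := pv_disj l "group:" "version:" 'g' 'v' "roup:".toList "ersion:".toList (by decide) (by decide) (by decide) hg
    have hd := pv_disj l "group:" "description:" 'g' 'd' "roup:".toList "escription:".toList (by decide) (by decide) (by decide) hg
    simp at hg hn hv hd
    simp [hg, hn, hv, hd]
    split_ifs with h1 <;> simp_all [PySem.Dict.insert]
  · by_cases hn : PySem.Str.startswith l "name:" = true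
    · have hv := pv_disj l "name:" "version:" 'n' 'v' "ame:".toList "ersion:".toList (by decide) (by decide) (by decide) hn
      have hd := pv_disj l "name:" "description:" 'n' 'd' "ame:".toList "escription:".toList (by decide) (by decide) (by decide) hn
      simp at hg hn hv hd
      simp [hg, hn, hv, hd]
      split_ifs with h1 <;> simp_all [PySem.Dict.insert]
    · by_cases hv : PySem.Str.startswith l "version:" = true
      · have hd := pv_disj l "version:" "description:" 'v' 'd' "ersion:".toList "escription:".toList (by decide) (by decide) (by decide) hv
        simp at hg hn hv hd
        simp [hg, hn, hv, hd]
        split_ifs with h1 <;> simp_all [PySem.Dict.insert]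
      · by_cases hd : PySem.Str.startswith l "description:" = true
        · simp at hg hn hv hd
          simp [hg, hn, hv, hd]
          split_ifs with h1 <;> simp_all [PySem.Dict.insert]
        · simp at hg hn hv hd
          simp [hg, hn, hv, hd]

-- the loop invariant: folding A's step equals B's four reverse scans
theorem pvMain (ls : List String) (g n v d : Option String) :
    (ls.foldl pvStepA (PySem.Dict.mk [("group_id", g), ("name", n), ("version", v), ("description", d)])).items
      = [("group_id", (pvLastValue ls.reverse "group:" ["null"]).or g),
         ("name", (pvLastValue ls.reverse "name:" ["null"]).or n),
         ("version", (pvLastValue ls.reverse "version:" ["null", "unspecified"]).or v),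
         ("description", (pvLastValue ls.reverse "description:" ["null"]).or d)] := by
  induction ls generalizing g n v d with
  | nil => simp [pvLastValue]
  | cons l ls ih =>
    rw [List.foldl_cons, pvStepA_shape, ih]
    simp only [List.reverse_cons, pvLastValue_append, Option.or_assoc]

-- ===== VERDICT (by name: the statement is the Claim_ definition above) =====
theorem parse_properties_output_py_spec : Claim_equal_parse_properties_output_py := by
  intro lc _
  unfold Spec_parse_properties_output_py parse_properties_output_py parse_properties_output_py_alt
  rw [pvMain]
  simp
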